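-- pv_equiv track=rewrite | github.com/azpm/django-scampi-cms | libscampi/contrib/cms/communism/templatetags/listutil.py | columns_distributed
-- ===== SOURCE A (Python) =====
-- def columns_distributed(thelist, n):
--     """
--     Break a list into ``n`` columns, distributing columns as evenly as possible
--     across the columns. For example::
--
--         >>> l = range(10)
--
--         >>> columns_distributed(l, 2)
--         [[0, 1, 2, 3, 4], [5, 6, 7, 8, 9]]
--
--         >>> columns_distributed(l, 3)
--         [[0, 1, 2, 3], [4, 5, 6], [7, 8, 9]]
--
--         >>> columns_distributed(l, 4)
--         [[0, 1, 2], [3, 4, 5], [6, 7], [8, 9]]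
--
--         >>> columns_distributed(l, 5)
--         [[0, 1], [2, 3], [4, 5], [6, 7], [8, 9]]
--
--         >>> columns_distributed(l, 9)
--         [[0, 1], [2], [3], [4], [5], [6], [7], [8], [9]]
--
--         # This filter will always return `n` columns, even if some are empty:
--         >>> columns(range(2), 3)
--         [[0], [1], []]
--     """
--     try:
--         n = int(n)
--         thelist = list(thelist)
--     except (ValueError, TypeError):
--         return [thelist]
--     list_len = len(thelist)
--     split = list_len // n
--
--     remainder = list_len % n
--     offset = 0
--     columns = []
--     for i in range(n):
--         if remainder:
--             start, end = (split+1)*i, (split+1)*(i+1)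
--         else:
--             start, end = split*i+offset, split*(i+1)+offset
--         columns.append(thelist[start:end])
--         if remainder:
--             remainder -= 1
--             offset += 1
--     return columns
-- ===== SOURCE B (Python) =====
-- def columns_distributed(thelist, n):
--     try:
--         n = int(n)
--         thelist = list(thelist)
--     except (ValueError, TypeError):
--         return [thelist]
--     split, remainder = divmod(len(thelist), n)
--     buckets = {}
--     for j, x in enumerate(thelist):
--         if j < remainder * (split + 1):
--             c = j // (split + 1)
--         else:
--             c = remainder + (j - remainder * (split + 1)) // split
--         buckets[c] = buckets.get(c, []) + [x]
--     return [buckets.get(i, []) for i in range(n)]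
-- ===== Notes on version B (the rewrite author's own statement) =====
-- stated objective: alternative
-- what changed: B replaces A's per-column slicing loop (branching start/end formulas with an offset counter) by a per-element scatter: each element is classified arithmetically into its column index and appended to a hash-map bucket, and the n buckets are read back at the end.
import Mathlib
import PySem

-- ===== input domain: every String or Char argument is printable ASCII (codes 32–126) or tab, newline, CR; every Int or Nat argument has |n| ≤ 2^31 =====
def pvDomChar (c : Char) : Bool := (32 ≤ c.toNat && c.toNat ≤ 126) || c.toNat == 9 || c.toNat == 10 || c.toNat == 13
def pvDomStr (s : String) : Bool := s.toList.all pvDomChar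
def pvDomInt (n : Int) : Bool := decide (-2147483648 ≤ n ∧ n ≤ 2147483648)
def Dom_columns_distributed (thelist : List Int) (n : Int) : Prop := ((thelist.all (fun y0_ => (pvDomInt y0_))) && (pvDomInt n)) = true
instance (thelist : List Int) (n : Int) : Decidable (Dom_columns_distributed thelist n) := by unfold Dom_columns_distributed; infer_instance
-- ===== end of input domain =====

-- B scatters each element into a dict bucket chosen by an arithmetic column
-- classification and reads the n buckets back, instead of A's per-column slicing
-- loop (objective: alternative algorithm, same cost).

-- ===== PORT A =====
-- try: int(n)/list(thelist) are identities on Int/List Int; the except branch is unreachable.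
-- Loop body of A's 'for i in range(n)' as a helper; state = (remainder, offset, columns).
def pvStepA (thelist : List Int) (split : Int) (st : Int × Int × List (List Int)) (i : Int) : Int × Int × List (List Int) :=
  let remainder := st.1
  let offset := st.2.1
  let columns := st.2.2
  let se := if remainder ≠ 0 then ((split+1)*i, (split+1)*(i+1))
            else (split*i+offset, split*(i+1)+offset)
  let columns := columns ++ [PySem.List.slice thelist (some se.1) (some se.2)]
  if remainder ≠ 0 then (remainder - 1, offset + 1, columns)
  else (remainder, offset, columns)

def columns_distributed (thelist : List Int) (n : Int) : List (List Int) :=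
  let list_len : Int := thelist.length
  let split := PySem.Int.floordiv list_len n
  ((PySem.List.pyRange 0 n 1).foldl (pvStepA thelist split) (PySem.Int.mod list_len n, 0, ([] : List (List Int)))).2.2

-- ===== PORT B =====
-- B's column classification of element index j (the if/else computing c).
def pvClass (s r j : Int) : Int :=
  if j < r * (s + 1) then PySem.Int.floordiv j (s + 1)
  else r + PySem.Int.floordiv (j - r * (s + 1)) s

-- Loop body of B's 'for j, x in enumerate(thelist)': buckets[c] = buckets.get(c, []) + [x].
def pvStepB (s r : Int) (d : PySem.Dict Int (List Int)) (p : Int × Int) : PySem.Dict Int (List Int) :=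
  let c := pvClass s r p.1
  d.insert c (d.getD c [] ++ [p.2])

def columns_distributed_alt (thelist : List Int) (n : Int) : List (List Int) :=
  let len : Int := thelist.length
  let split := PySem.Int.floordiv len n
  let remainder := PySem.Int.mod len n
  let buckets := (PySem.List.enumerate thelist 0).foldl (pvStepB split remainder) PySem.Dict.empty
  (PySem.List.pyRange 0 n 1).map (fun i => buckets.getD i [])

-- ===== PRECONDITION & SPEC =====
-- n = 0 makes Python's divmod/'//' raise ZeroDivisionError (in both A and B).
def Pre_columns_distributed (thelist : List Int) (n : Int) : Prop := n ≠ 0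
instance (thelist : List Int) (n : Int) : Decidable (Pre_columns_distributed thelist n) := by unfold Pre_columns_distributed; infer_instance
def pvWitness_columns_distributed : List Int × Int := ([0, 1, 2, 3, 4], 3)

def Spec_columns_distributed (thelist : List Int) (n : Int) (out : List (List Int)) : Prop := out = columns_distributed_alt thelist n
instance (thelist : List Int) (n : Int) (out : List (List Int)) : Decidable (Spec_columns_distributed thelist n out) := by unfold Spec_columns_distributed; infer_instance

-- ===== CLAIM (what is proved, stated in full; the proofs are below) =====
def Claim_equal_columns_distributed : Prop := ∀ (thelist : List Int) (n : Int), Dom_columns_distributed thelist n → Pre_columns_distributed thelist n → Spec_columns_distributed thelist n (columns_distributed thelist n)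

-- ===== LEMMAS AND PROOFS =====

-- Start offset of column i (uniform closed form of both programs' boundaries).
def pvStart (s r i : Int) : Int := s * i + min i r

-- Closed form of the i-th column's slice, the shared target of both loop characterisations.
def pvCol (thelist : List Int) (s r i : Int) : List Int :=
  if i < r then PySem.List.slice thelist (some ((s+1)*i)) (some ((s+1)*(i+1)))
  else PySem.List.slice thelist (some (s*i+r)) (some (s*(i+1)+r))

lemma pvCol_start (thelist : List Int) (s r i : Int) :
    pvCol thelist s r i
    = PySem.List.slice thelist (some (pvStart s r i)) (some (pvStart s r (i+1))) := by
  unfold pvCol pvStart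
  split_ifs with h
  · rw [min_eq_left (by omega), min_eq_left (by omega)]
    congr 2 <;> ring
  · rw [min_eq_right (by omega), min_eq_right (by omega)]

-- A's loop, characterised by its invariant: after processing indices < i,
-- remainder = max (r-i) 0 and offset = min i r.
lemma pvAloop (thelist : List Int) (s r : Int) :
    ∀ (k : Nat) (i : Int) (acc : List (List Int)), 0 ≤ i →
    (PySem.List.pyRange i (i + k) 1).foldl (pvStepA thelist s) (max (r - i) 0, min i r, acc)
    = (max (r - (i + k)) 0, min (i + k) r,
       acc ++ (PySem.List.pyRange i (i + k) 1).map (pvCol thelist s r)) := by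
  intro k
  induction k with
  | zero =>
      intro i acc hi
      rw [show i + ((0:Nat):Int) = i by push_cast; ring, PySem.List.pyRange_one_eq_nil le_rfl]
      simp
  | succ k ih =>
      intro i acc hi
      have hlt : i < i + (((k:Nat)+1:Nat):Int) := by push_cast; omega
      rw [PySem.List.pyRange_one_cons hlt, List.foldl_cons, List.map_cons]
      by_cases h : i < r
      · have hx : max (r - i) 0 ≠ 0 := by omega
        have hstep : pvStepA thelist s (max (r - i) 0, min i r, acc) i
            = (max (r - (i+1)) 0, min (i+1) r,
               acc ++ [PySem.List.slice thelist (some ((s+1)*i)) (some ((s+1)*(i+1)))]) := by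
          simp only [pvStepA, if_pos hx, Prod.mk.injEq]
          exact ⟨by omega, by omega, trivial⟩
        rw [hstep]
        have hrec := ih (i+1)
          (acc ++ [PySem.List.slice thelist (some ((s+1)*i)) (some ((s+1)*(i+1)))]) (by omega)
        rw [show i + 1 + ((k:Nat):Int) = i + (((k:Nat)+1:Nat):Int) by push_cast; ring] at hrec
        rw [hrec]
        have hcol : pvCol thelist s r i
            = PySem.List.slice thelist (some ((s+1)*i)) (some ((s+1)*(i+1))) := by
          simp [pvCol, h]
        simp [hcol]
      · have hx : ¬ (max (r - i) 0 ≠ 0) := by omega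
        have hstep : pvStepA thelist s (max (r - i) 0, min i r, acc) i
            = (max (r - (i+1)) 0, min (i+1) r,
               acc ++ [PySem.List.slice thelist (some (s*i + min i r)) (some (s*(i+1) + min i r))]) := by
          simp only [pvStepA, if_neg hx, Prod.mk.injEq]
          exact ⟨by omega, by omega, trivial⟩
        rw [hstep]
        have hrec := ih (i+1)
          (acc ++ [PySem.List.slice thelist (some (s*i + min i r)) (some (s*(i+1) + min i r))]) (by omega)
        rw [show i + 1 + ((k:Nat):Int) = i + (((k:Nat)+1:Nat):Int) by push_cast; ring] at hrec
        rw [hrec]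
        have hcol : pvCol thelist s r i
            = PySem.List.slice thelist (some (s*i + min i r)) (some (s*(i+1) + min i r)) := by
          rw [show min i r = r by omega]
          simp [pvCol, h]
        simp [hcol]

-- B's grouping fold: getD i of the built dict = prior bucket ++ elements classified to i, in order.
lemma pvGroup (s r : Int) :
    ∀ (xs : List (Int × Int)) (d : PySem.Dict Int (List Int)) (i : Int),
    (xs.foldl (pvStepB s r) d).getD i []
    = d.getD i [] ++ (xs.filter (fun p => pvClass s r p.1 == i)).map (·.2) := by
  intro xs
  induction xs with
  | nil => intro d i; simp
  | cons p xs ih =>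
      intro d i
      rw [List.foldl_cons, ih]
      by_cases h : pvClass s r p.1 = i
      · rw [List.filter_cons_of_pos (by simpa using h)]
        simp only [pvStepB, h, List.map_cons]
        rw [PySem.Dict.getD_insert_self]
        simp
      · rw [List.filter_cons_of_neg (by simpa using h)]
        simp only [pvStepB]
        rw [PySem.Dict.getD_insert_of_ne _ _ _ (show i ≠ pvClass s r p.1 by simpa using Ne.symm h)]

-- Filtering an enumeration by an index interval is a take/drop.
lemma pvEnumFilter (a b : Int) :
    ∀ (xs : List Int) (t : Int),
    (((PySem.List.enumerate xs t).filter (fun p => decide (a ≤ p.1 ∧ p.1 < b))).map (·.2))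
    = (xs.take (b - t).toNat).drop (a - t).toNat := by
  intro xs
  induction xs with
  | nil => intro t; simp [PySem.List.enumerate_nil]
  | cons x xs ih =>
      intro t
      rw [PySem.List.enumerate_cons]
      by_cases hb : t < b
      · have htk : (b - t).toNat = (b - (t+1)).toNat + 1 := by omega
        by_cases ha : a ≤ t
        · rw [List.filter_cons_of_pos (by simp; omega)]
          simp only [List.map_cons, ih (t+1), htk, List.take_succ_cons]
          rw [show (a - t).toNat = 0 by omega, show (a - (t+1)).toNat = 0 by omega]
          simp
        · rw [List.filter_cons_of_neg (by simp; omega)]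
          rw [ih (t+1), htk, List.take_succ_cons,
              show (a - t).toNat = (a - (t+1)).toNat + 1 by omega, List.drop_succ_cons]
      · rw [List.filter_cons_of_neg (by simp; omega)]
        rw [ih (t+1), show (b - t).toNat = 0 by omega, show (b - (t+1)).toNat = 0 by omega]
        simp

-- The classification lands in column i exactly on i's interval [pvStart i, pvStart (i+1)).
lemma pvClass_interval (s r n i j : Int) (hs : 0 ≤ s) (hjL : j < s * n + r) :
    (pvClass s r j = i) ↔ (pvStart s r i ≤ j ∧ j < pvStart s r (i+1)) := by
  unfold pvClass pvStart
  split_ifs with h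
  · -- j < r*(s+1): c = j // (s+1)
    rw [PySem.Int.floordiv_eq_iff_of_pos (by omega)]
    by_cases hir : i < r
    · rw [min_eq_left (by omega), min_eq_left (by omega)]
      constructor <;> intro hcc <;> constructor <;> nlinarith [hcc.1, hcc.2]
    · -- i ≥ r: both sides false
      have h1 : ¬ (i * (s+1) ≤ j) := by nlinarith
      have h2 : ¬ (s * i + min i r ≤ j) := by
        rw [min_eq_right (by omega)]
        nlinarith
      constructor <;> intro hcc
      · exact absurd hcc.1 h1
      · exact absurd hcc.1 h2
  · -- j ≥ r*(s+1): c = r + (j - r*(s+1)) // s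
    have hs' : 0 < s := by
      rcases lt_or_eq_of_le hs with h' | h'
      · exact h'
      · exfalso; rw [← h'] at hjL h; simp at hjL h; omega
    by_cases hir : i < r
    · -- both sides false
      have hq : 0 ≤ PySem.Int.floordiv (j - r * (s + 1)) s := by
        rw [PySem.Int.floordiv_eq_ediv_of_pos hs']
        exact Int.ediv_nonneg (by omega) (by omega)
      have h2 : ¬ (j < s * (i+1) + min (i+1) r) := by
        rw [min_eq_left (by omega)]
        nlinarith
      constructor <;> intro hcc
      · omega
      · exact absurd hcc.2 h2
    · rw [min_eq_right (by omega), min_eq_right (by omega)]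
      have : (r + PySem.Int.floordiv (j - r * (s + 1)) s = i)
          ↔ (PySem.Int.floordiv (j - r * (s + 1)) s = i - r) := by omega
      rw [this, PySem.Int.floordiv_eq_iff_of_pos hs']
      constructor <;> intro hcc <;> constructor <;> nlinarith [hcc.1, hcc.2]

-- ===== VERDICT (by name: the statement is the Claim_ definition above) =====
theorem columns_distributed_spec : Claim_equal_columns_distributed := by
  intro thelist n _ hn
  unfold Spec_columns_distributed
  have hA' : columns_distributed thelist n
      = ((PySem.List.pyRange 0 n 1).foldl
          (pvStepA thelist (PySem.Int.floordiv (thelist.length : Int) n))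
          (PySem.Int.mod (thelist.length : Int) n, 0, ([] : List (List Int)))).2.2 := rfl
  have hB' : columns_distributed_alt thelist n
      = (PySem.List.pyRange 0 n 1).map (fun i =>
          ((PySem.List.enumerate thelist 0).foldl
            (pvStepB (PySem.Int.floordiv (thelist.length : Int) n)
                     (PySem.Int.mod (thelist.length : Int) n))
            PySem.Dict.empty).getD i []) := rfl
  obtain ⟨s, hs⟩ : ∃ s, PySem.Int.floordiv (thelist.length : Int) n = s := ⟨_, rfl⟩
  obtain ⟨r, hr⟩ : ∃ r, PySem.Int.mod (thelist.length : Int) n = r := ⟨_, rfl⟩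
  rw [hA', hB', hs, hr]
  by_cases hpos : 0 < n
  · have hr0 : 0 ≤ r := hr ▸ PySem.Int.mod_nonneg (thelist.length : Int) hpos
    have hrn : r < n := hr ▸ PySem.Int.mod_lt (thelist.length : Int) hpos
    have hs0 : 0 ≤ s := by
      rw [← hs, PySem.Int.floordiv_eq_ediv_of_pos hpos]
      exact Int.ediv_nonneg (by positivity) (by omega)
    have hL : s * n + r = (thelist.length : Int) := by
      have := PySem.Int.floordiv_mul_add_mod (thelist.length : Int) n
      rw [hs, hr] at this
      nlinarith [this]
    -- A side
    have hA := pvAloop thelist s r n.toNat 0 [] le_rfl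
    rw [show (0:Int) + ((n.toNat : Nat) : Int) = n by omega, show max (r - 0) 0 = r by omega,
        show min (0:Int) r = 0 by omega] at hA
    rw [hA]
    simp only [List.nil_append]
    -- B side: pointwise on i ∈ range(n)
    apply List.map_congr_left
    intro i hiMem
    obtain ⟨hi0, hin⟩ := (PySem.List.mem_pyRange_one).mp hiMem
    rw [pvGroup]
    have hDe : (PySem.Dict.empty : PySem.Dict Int (List Int)).getD i [] = [] := rfl
    rw [hDe, List.nil_append]
    have hfc : ((PySem.List.enumerate thelist 0).filter (fun p => pvClass s r p.1 == i))
        = ((PySem.List.enumerate thelist 0).filter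
            (fun p => decide (pvStart s r i ≤ p.1 ∧ p.1 < pvStart s r (i+1)))) := by
      apply List.filter_congr
      intro p hp
      have hp1 : p.1 ∈ (PySem.List.enumerate thelist 0).map (·.1) := List.mem_map_of_mem hp
      rw [PySem.List.map_fst_enumerate] at hp1
      obtain ⟨hj0, hjL⟩ := (PySem.List.mem_pyRange_one).mp hp1
      have hjL' : p.1 < s * n + r := by omega
      have hiff := pvClass_interval s r n i p.1 hs0 hjL'
      rw [Bool.eq_iff_iff]
      simp only [beq_iff_eq, decide_eq_true_eq]
      exact hiff
    rw [hfc, pvEnumFilter]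
    rw [pvCol_start thelist s r i]
    have ha0 : 0 ≤ pvStart s r i := by
      unfold pvStart
      have : 0 ≤ s * i := by positivity
      omega
    have hb0 : 0 ≤ pvStart s r (i+1) := by
      unfold pvStart
      have : 0 ≤ s * (i+1) := by positivity
      omega
    rw [PySem.List.slice_toNat _ ha0 hb0, List.drop_take]
    simp only [sub_zero]
  · have hn' : n ≠ 0 := hn
    have hneg : n < 0 := by omega
    have hb := PySem.Int.mod_neg_bounds (thelist.length : Int) hneg
    rw [hr] at hb
    rw [PySem.List.pyRange_one_eq_nil (by omega : n ≤ (0:Int))]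
    simp
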